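-- pv_equiv track=rewrite | github.com/AdamZhouSE/pythonHomework | Code/CodeRecords/2786/60675/284277.py | func
-- ===== SOURCE A (Python) =====
-- import bisect
--
-- def func(n:int, m: list) -> str:
--     m.sort()
--     cnt = 0
--     for i in range(1, n+1):
--         if bisect.bisect_left(m,i) != len(m):
--             cnt = i
--             m.remove(m[bisect.bisect_left(m,i)])
--         else:
--             break
--     return cnt
-- ===== SOURCE B (Python) =====
-- def func(n: int, m: list) -> str:
--     # One fold over the sorted values: c counts how many of 1..n have been
--     # matched so far; a value x extends the streak iff x > c and c < n.
--     # Returns A's value; unlike A, does not mutate m.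
--     c = 0
--     for x in sorted(m):
--         if c < n and x > c:
--             c += 1
--     return c
-- ===== Notes on version B (the rewrite author's own statement) =====
-- stated objective: faster
-- what changed: Replaced the loop over i=1..n with per-step bisect + list.remove (each O(m)) by one sort and a single fold over the sorted values with a match counter c (a value x extends the streak iff x > c); B also does not mutate the argument list.
import Mathlib
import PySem

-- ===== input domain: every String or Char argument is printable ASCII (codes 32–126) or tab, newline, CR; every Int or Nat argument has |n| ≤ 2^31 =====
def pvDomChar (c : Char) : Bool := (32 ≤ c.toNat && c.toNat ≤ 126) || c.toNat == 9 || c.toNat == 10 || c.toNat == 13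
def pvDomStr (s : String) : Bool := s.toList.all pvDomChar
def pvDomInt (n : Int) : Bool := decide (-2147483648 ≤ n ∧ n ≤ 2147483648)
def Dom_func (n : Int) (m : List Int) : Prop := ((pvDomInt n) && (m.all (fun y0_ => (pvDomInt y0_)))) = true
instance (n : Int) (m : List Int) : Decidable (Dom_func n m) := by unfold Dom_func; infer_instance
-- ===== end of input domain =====

-- B replaces A's per-i bisect + remove loop by one sort and a single fold over the
-- sorted values with a match counter; return values agree everywhere (A sorts and
-- shrinks the caller's list in place, B leaves it untouched — the equivalence
-- proved here is about the return value only).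

-- ===== PORT A =====
-- loop 'for i in range(1, n+1)': fuel = number of remaining iterations, i = current value.
def funcLoop (fuel : Nat) (i : Int) (m : List Int) (cnt : Int) : Int :=
  match fuel with
  | 0 => cnt
  | f + 1 =>
    if PySem.List.bisectLeft m i ≠ m.length then
      -- cnt = i; m.remove(m[bisect.bisect_left(m, i)])
      match PySem.List.pyGet? m (PySem.List.bisectLeft m i : Nat) with
      | some v =>
        match PySem.List.remove? m v with
        | some m' => funcLoop f (i + 1) m' i
        | none => i      -- unreachable: v was just read from m
      | none => cnt      -- unreachable: bisect_left m i < len(m)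
    else cnt

def func (n : Int) (m : List Int) : Int :=
  funcLoop n.toNat 1 (PySem.List.sorted m (fun x => x)) 0

-- ===== PORT B =====
-- Source B's 'for x in sorted(m)' with accumulator c is a left fold over the sorted list.
def func_alt (n : Int) (m : List Int) : Int :=
  (PySem.List.sorted m (fun x => x)).foldl
    (fun c x => if c < n ∧ c < x then c + 1 else c) 0

-- ===== PRECONDITION & SPEC =====
def Spec_func (n : Int) (m : List Int) (out : Int) : Prop := out = func_alt n m
instance (n : Int) (m : List Int) (out : Int) : Decidable (Spec_func n m out) := by unfold Spec_func; infer_instance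

-- ===== CLAIM (what is proved, stated in full; the proofs are below) =====
def Claim_equal_func : Prop := ∀ (n : Int) (m : List Int), Dom_func n m → Spec_func n m (func n m)

-- ===== LEMMAS AND PROOFS =====

-- bisect_left returns the length when every element is < i
lemma bisect_all (u : List Int) (i : Int) (hs : u.Pairwise (· ≤ ·))
    (h : ∀ x ∈ u, x < i) : PySem.List.bisectLeft u i = u.length := by
  obtain ⟨hle, _, hge⟩ := PySem.List.bisectLeft_spec u i hs
  by_contra hne
  have hk : PySem.List.bisectLeft u i < u.length := lt_of_le_of_ne hle hne
  have := hge _ hk le_rfl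
  exact absurd (h _ (u.getElem_mem hk)) (not_lt.mpr this)

-- bisect_left lands exactly at the first element ≥ i
lemma bisect_split (T : List Int) (v : Int) (rest : List Int) (i : Int)
    (hs : (T ++ v :: rest).Pairwise (· ≤ ·))
    (hT : ∀ x ∈ T, x < i) (hv : i ≤ v) :
    PySem.List.bisectLeft (T ++ v :: rest) i = T.length := by
  obtain ⟨hle, hlt, hge⟩ := PySem.List.bisectLeft_spec (T ++ v :: rest) i hs
  set k := PySem.List.bisectLeft (T ++ v :: rest) i with hk
  have hTlen : T.length < (T ++ v :: rest).length := by simp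
  rcases lt_trichotomy k T.length with h | h | h
  · have hk' : k < (T ++ v :: rest).length := lt_trans h hTlen
    have hik := hge k hk' le_rfl
    have : (T ++ v :: rest)[k] = T[k]'h := List.getElem_append_left h
    rw [this] at hik
    exact absurd (hT _ (T.getElem_mem h)) (not_lt.mpr hik)
  · exact h
  · have := hlt T.length hTlen h
    have hv' : (T ++ v :: rest)[T.length]'hTlen = v := by
      rw [List.getElem_append_right (le_refl T.length)]
      simp
    rw [hv'] at this
    exact absurd hv (not_le.mpr this)

-- the first element surviving dropWhile fails the predicate
lemma dropWhile_head_false {p : Int → Bool} : ∀ {s : List Int} {v : Int} {rest : List Int},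
    s.dropWhile p = v :: rest → p v = false := by
  intro s
  induction s with
  | nil => intro v rest h; simp [List.dropWhile] at h
  | cons a t ih =>
    intro v rest h
    by_cases hp : p a
    · rw [List.dropWhile_cons] at h
      simp [hp] at h
      exact ih h
    · rw [List.dropWhile_cons] at h
      simp [hp] at h
      rcases h with ⟨rfl, rfl⟩
      simpa using hp

-- B's fold is stalled once c has reached n
lemma fold_ge (n : Int) : ∀ (s : List Int) (c : Int), n ≤ c →
    s.foldl (fun c x => if c < n ∧ c < x then c + 1 else c) c = c := by
  intro s
  induction s with
  | nil => intro c _; rfl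
  | cons a t ih =>
    intro c hc
    simp only [List.foldl]
    rw [if_neg (by omega : ¬ (c < n ∧ c < a))]
    exact ih c hc

-- B's fold is stalled on values ≤ c
lemma fold_skip (n : Int) : ∀ (tw l : List Int) (c : Int), (∀ x ∈ tw, x ≤ c) →
    (tw ++ l).foldl (fun c x => if c < n ∧ c < x then c + 1 else c) c
      = l.foldl (fun c x => if c < n ∧ c < x then c + 1 else c) c := by
  intro tw
  induction tw with
  | nil => intro l c _; rfl
  | cons a t ih =>
    intro l c h
    simp only [List.cons_append, List.foldl]
    rw [if_neg (by have := h a (by simp); omega : ¬ (c < n ∧ c < a))]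
    exact ih l c (fun x hx => h x (by simp [hx]))

-- main invariant: A's list is T ++ s where T holds the already-skipped elements
-- (all ≤ c), i = c + 1, cnt = c, fuel = n - c; B folds over the suffix s with c.
lemma loop_eq (n : Int) : ∀ (f : Nat) (c : Int) (T s : List Int),
    (T ++ s).Pairwise (· ≤ ·) → (∀ x ∈ T, x ≤ c) → (f : Int) = n - c →
    funcLoop f (c + 1) (T ++ s) c
      = s.foldl (fun c x => if c < n ∧ c < x then c + 1 else c) c := by
  intro f
  induction f with
  | zero =>
    intro c T s _ _ hf
    have : n ≤ c := by omega
    rw [fold_ge n s c this]; rfl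
  | succ f ih =>
    intro c T s hs hT hf
    rcases hd : s.dropWhile (fun x => decide (x < c + 1)) with _ | ⟨v, rest⟩
    · -- every element of s is ≤ c : A's bisect hits the end, B's fold stalls
      have hsle : ∀ x ∈ s, x ≤ c := by
        intro x hx
        have := List.dropWhile_eq_nil_iff.mp hd x hx
        simp at this; omega
      have hall : ∀ x ∈ T ++ s, x < c + 1 := by
        intro x hx
        rcases List.mem_append.mp hx with h | h
        · have := hT x h; omega
        · have := hsle x h; omega
      have hb := bisect_all (T ++ s) (c + 1) hs hall
      have hfold := fold_skip n s [] c hsle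
      simp only [List.append_nil] at hfold
      simp [funcLoop, hb, hfold]
    · -- s = tw ++ v :: rest with tw all ≤ c and c + 1 ≤ v
      have hsplit : s = s.takeWhile (fun x => decide (x < c + 1)) ++ v :: rest := by
        conv_lhs => rw [← List.takeWhile_append_dropWhile (p := fun x => decide (x < c + 1)) (l := s)]
        rw [hd]
      set tw := s.takeWhile (fun x => decide (x < c + 1)) with htw
      have htwle : ∀ x ∈ tw, x ≤ c := by
        intro x hx
        have := List.mem_takeWhile_imp hx
        simp at this; omega
      have hvge : c + 1 ≤ v := by
        have := dropWhile_head_false hd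
        simp at this; omega
      have hU : T ++ s = (T ++ tw) ++ v :: rest := by
        rw [hsplit, htw]; simp
      have hTtw : ∀ x ∈ T ++ tw, x ≤ c := by
        intro x hx
        rcases List.mem_append.mp hx with h | h
        · exact hT x h
        · exact htwle x h
      have hTtw' : ∀ x ∈ T ++ tw, x < c + 1 := fun x hx => by have := hTtw x hx; omega
      have hs' : ((T ++ tw) ++ v :: rest).Pairwise (· ≤ ·) := hU ▸ hs
      have hb : PySem.List.bisectLeft (T ++ s) (c + 1) = (T ++ tw).length := by
        rw [hU]; exact bisect_split _ _ _ _ hs' hTtw' hvge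
      have hlen : (T ++ s).length = (T ++ tw).length + 1 + rest.length := by
        rw [hU]; simp; omega
      have hne : PySem.List.bisectLeft (T ++ s) (c + 1) ≠ (T ++ s).length := by
        rw [hb, hlen]; omega
      have hget : PySem.List.pyGet? (T ++ s) ((PySem.List.bisectLeft (T ++ s) (c + 1) : Nat) : Int)
          = some v := by
        rw [PySem.List.pyGet?_natCast, hb, hU]
        rw [List.getElem?_append_right (le_refl (T ++ tw).length)]
        simp
      have hvmem : v ∈ T ++ s := by rw [hU]; simp
      have hvnot : v ∉ T ++ tw := by
        intro hmem
        have := hTtw v hmem; omega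
      have herase : (T ++ s).erase v = (T ++ tw) ++ rest := by
        rw [hU, List.erase_append_right _ hvnot, List.erase_cons_head]
      have hrem : PySem.List.remove? (T ++ s) v = some ((T ++ tw) ++ rest) := by
        rw [PySem.List.remove?_eq_some_erase _ _ hvmem, herase]
      have hs'' : ((T ++ tw) ++ rest).Pairwise (· ≤ ·) := by
        have hsub : ((T ++ tw) ++ rest).Sublist ((T ++ tw) ++ v :: rest) := by
          apply List.Sublist.append_left
          exact List.sublist_cons_self v rest
        exact hs'.sublist hsub
      -- B's side: skip tw (all ≤ c), take v (c < n since fuel ≥ 1, and c < v)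
      have hfoldB : s.foldl (fun c x => if c < n ∧ c < x then c + 1 else c) c
          = rest.foldl (fun c x => if c < n ∧ c < x then c + 1 else c) (c + 1) := by
        conv_lhs => rw [hsplit]
        rw [fold_skip n tw (v :: rest) c htwle]
        simp only [List.foldl]
        rw [if_pos (by constructor <;> omega : c < n ∧ c < v)]
      simp only [funcLoop]
      rw [if_pos hne]
      simp only [hget, hrem, hfoldB]
      exact ih (c + 1) (T ++ tw) rest hs''
        (fun x hx => by have := hTtw x hx; omega) (by omega)

-- ===== VERDICT (by name: the statement is the Claim_ definition above) =====
theorem func_spec : Claim_equal_func := by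
  intro n m _
  unfold Spec_func func func_alt
  by_cases hn : 0 ≤ n
  · have := loop_eq n n.toNat 0 [] (PySem.List.sorted m (fun x => x))
      (by simpa using PySem.List.sorted_pairwise m (fun x => x)) (by simp) (by omega)
    simpa using this
  · have h0 : n.toNat = 0 := by omega
    rw [h0, fold_ge n _ 0 (by omega)]
    rfl
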